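-- pv_equiv track=rewrite | github.com/Aayushjn/zerok-auth | zerok/server/app/routes.py | compare_adj_lists
-- ===== SOURCE A (Python) =====
-- from collections import Counter
--
-- def compare_adj_lists(
--     adj_list1: dict[int, list[int]], adj_list2: dict[int, list[int]]
-- ) -> bool:
--     def _compare_list(l1: list[int], l2: list[int]) -> bool:
--         return Counter(l1) == Counter(l2)
--
--     if len(adj_list1) != len(adj_list2):
--         return False
--
--     for v1, v2 in zip(adj_list1.values(), adj_list2.values()):
--         if not _compare_list(v1, v2):
--             return False
--
--     return True
-- ===== SOURCE B (Python) =====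
-- def compare_adj_lists(adj_list1, adj_list2):
--     # Multiset equality by successive elimination: pull each element of l1 out of a
--     # shrinking copy of l2; equal multisets iff every pull succeeds and nothing is left.
--     def _match(l1, l2):
--         if not l1:
--             return not l2
--         x, xs = l1[0], l1[1:]
--         if x not in l2:
--             return False
--         ys = list(l2)
--         ys.remove(x)
--         return _match(xs, ys)
--
--     def _go(pairs):
--         if not pairs:
--             return True
--         (a, b), rest = pairs[0], pairs[1:]
--         return _match(a, b) and _go(rest)
--
--     return len(adj_list1) == len(adj_list2) and _go(
--         list(zip(adj_list1.values(), adj_list2.values()))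
--     )
-- ===== Notes on version B (the rewrite author's own statement) =====
-- stated objective: alternative
-- what changed: Per-vertex multiset equality is decided by recursive elimination (removing each element of the first list from a shrinking copy of the second, succeeding iff nothing is left over) instead of building and comparing two Counter histograms, and the whole comparison is a recursive descent rather than an imperative early-exit loop.
import Mathlib
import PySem

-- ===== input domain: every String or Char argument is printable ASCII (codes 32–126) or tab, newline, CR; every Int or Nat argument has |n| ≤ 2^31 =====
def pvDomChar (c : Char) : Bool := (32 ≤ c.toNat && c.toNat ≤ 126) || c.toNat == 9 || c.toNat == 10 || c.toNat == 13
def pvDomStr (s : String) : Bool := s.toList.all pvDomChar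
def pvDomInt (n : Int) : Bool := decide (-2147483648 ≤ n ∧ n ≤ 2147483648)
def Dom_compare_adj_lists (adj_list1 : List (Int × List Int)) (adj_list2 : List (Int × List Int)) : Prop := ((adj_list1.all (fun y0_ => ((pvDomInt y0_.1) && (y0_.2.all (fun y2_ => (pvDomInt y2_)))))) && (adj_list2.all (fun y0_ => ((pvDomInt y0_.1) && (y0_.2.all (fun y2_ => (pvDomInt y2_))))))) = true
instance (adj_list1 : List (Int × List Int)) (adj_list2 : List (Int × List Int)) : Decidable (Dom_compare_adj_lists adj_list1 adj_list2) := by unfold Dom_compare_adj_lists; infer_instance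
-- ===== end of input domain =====

-- B decides per-vertex multiset equality by recursive elimination (remove each element of the
-- first list from a shrinking copy of the second) instead of comparing Counter histograms, and
-- replaces the imperative early-exit loop by a recursive descent (alternative; same value).

-- ===== PORT A =====
-- Python dict equality (ignores insertion order): same keys, same values under lookup.
def pvDictEq (c1 c2 : PySem.Dict Int Int) : Bool :=
  (c1.keys.all (fun k => c1.get? k == c2.get? k)) &&
  (c2.keys.all (fun k => c2.get? k == c1.get? k))

-- _compare_list: Counter(l1) == Counter(l2)
def pvCompareList (l1 l2 : List Int) : Bool :=
  pvDictEq (PySem.Dict.counter l1) (PySem.Dict.counter l2)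

-- the for-loop over zip(values, values) with early return
def pvLoopA : List (List Int × List Int) → Bool
  | [] => true
  | (v1, v2) :: rest => if !(pvCompareList v1 v2) then false else pvLoopA rest

def compare_adj_lists (adj_list1 : List (Int × List Int)) (adj_list2 : List (Int × List Int)) : Bool :=
  if adj_list1.length ≠ adj_list2.length then false
  else pvLoopA (List.zip (adj_list1.map Prod.snd) (adj_list2.map Prod.snd))

-- ===== PORT B =====
-- _match: multiset equality by successive removal of l1's head from l2
def pvMatch : List Int → List Int → Bool
  | [], l2 => l2.isEmpty
  | x :: xs, l2 =>
    if l2.contains x then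
      match PySem.List.remove? l2 x with
      | some ys => pvMatch xs ys
      | none => false
    else false

-- _go: recursive descent over the zipped value pairs
def pvGo : List (List Int × List Int) → Bool
  | [] => true
  | (a, b) :: rest => pvMatch a b && pvGo rest

def compare_adj_lists_alt (adj_list1 : List (Int × List Int)) (adj_list2 : List (Int × List Int)) : Bool :=
  (adj_list1.length == adj_list2.length) &&
    pvGo (List.zip (adj_list1.map Prod.snd) (adj_list2.map Prod.snd))

-- ===== PRECONDITION & SPEC =====
def Spec_compare_adj_lists (adj_list1 : List (Int × List Int)) (adj_list2 : List (Int × List Int)) (out : Bool) : Prop := out = compare_adj_lists_alt adj_list1 adj_list2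
instance (adj_list1 : List (Int × List Int)) (adj_list2 : List (Int × List Int)) (out : Bool) : Decidable (Spec_compare_adj_lists adj_list1 adj_list2 out) := by unfold Spec_compare_adj_lists; infer_instance

-- ===== CLAIM =====
def Claim_equal_compare_adj_lists : Prop := ∀ (adj_list1 : List (Int × List Int)) (adj_list2 : List (Int × List Int)), Dom_compare_adj_lists adj_list1 adj_list2 → Spec_compare_adj_lists adj_list1 adj_list2 (compare_adj_lists adj_list1 adj_list2)

-- ===== LEMMAS AND PROOFS =====

theorem pv_get?_counter (xs : List Int) (v : Int) :
    (PySem.Dict.counter xs).get? v = if v ∈ xs then some (xs.count v : Int) else none := by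
  by_cases h : v ∈ xs
  · simp only [h, if_true]
    have hc : (PySem.Dict.counter xs).get? v ≠ none := by
      simp [PySem.Dict.get?_eq_none_iff_not_mem_keys, PySem.Dict.keys_counter, h]
    obtain ⟨w, hw⟩ := Option.ne_none_iff_exists'.1 hc
    have := PySem.Dict.getD_counter xs v
    rw [PySem.Dict.getD_eq_get?_getD, hw] at this
    simp only [Option.getD_some] at this
    rw [hw, this]
  · simp only [h, if_false]
    rw [PySem.Dict.get?_eq_none_iff_not_mem_keys, PySem.Dict.keys_counter]
    simpa using h

theorem pv_compareList_iff (l1 l2 : List Int) :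
    pvCompareList l1 l2 = true ↔ ∀ v : Int, l1.count v = l2.count v := by
  simp only [pvCompareList, pvDictEq, Bool.and_eq_true, List.all_eq_true,
    PySem.Dict.keys_counter, PySem.Set.mem_ofList, pv_get?_counter, beq_iff_eq]
  constructor
  · rintro ⟨h1, h2⟩ v
    by_cases hv1 : v ∈ l1
    · have := h1 v hv1
      by_cases hv2 : v ∈ l2
      · simp only [hv1, hv2, if_true, Option.some_inj] at this
        exact_mod_cast this
      · simp [hv1, hv2] at this
    · by_cases hv2 : v ∈ l2
      · have := h2 v hv2; simp [hv1, hv2] at this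
      · simp [List.count_eq_zero_of_not_mem, hv1, hv2]
  · intro h
    constructor
    · intro v hv1
      have hv2 : v ∈ l2 := by
        rw [← List.count_pos_iff]; rw [← h v]; exact List.count_pos_iff.2 hv1
      simp [hv1, hv2, h v]
    · intro v hv2
      have hv1 : v ∈ l1 := by
        rw [← List.count_pos_iff]; rw [h v]; exact List.count_pos_iff.2 hv2
      simp [hv1, hv2, h v]

theorem pv_match_iff_perm (l1 l2 : List Int) :
    pvMatch l1 l2 = true ↔ l1.Perm l2 := by
  induction l1 generalizing l2 with
  | nil =>
    constructor
    · intro h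
      have h2 : l2 = [] := List.isEmpty_iff.1 (by simpa [pvMatch] using h)
      simp [h2]
    · intro h
      have h2 : l2 = [] := h.symm.eq_nil
      simp [pvMatch, h2]
  | cons x xs ih =>
    by_cases hx : x ∈ l2
    · have hrw := PySem.List.remove?_eq_some_erase (v := x) (xs := l2) hx
      simp only [pvMatch, List.contains_eq_mem, hx, decide_true, if_true, hrw]
      rw [ih]
      constructor
      · intro h; exact List.cons_perm_iff_perm_erase.2 ⟨hx, h⟩
      · intro h; exact (List.cons_perm_iff_perm_erase.1 h).2
    · simp only [pvMatch, List.contains_eq_mem, hx, decide_false]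
      constructor
      · intro h; cases h
      · intro h; exact absurd (h.mem_iff.1 (List.mem_cons_self)) hx

theorem pv_inner_eq (l1 l2 : List Int) : pvCompareList l1 l2 = pvMatch l1 l2 := by
  rw [Bool.eq_iff_iff, pv_compareList_iff, pv_match_iff_perm]
  exact (List.perm_iff_count).symm

theorem pv_loop_eq (zs : List (List Int × List Int)) : pvLoopA zs = pvGo zs := by
  induction zs with
  | nil => rfl
  | cons p rest ih =>
    obtain ⟨v1, v2⟩ := p
    simp only [pvLoopA, pvGo, pv_inner_eq, ih]
    cases h : pvMatch v1 v2 <;> simp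

-- ===== VERDICT =====
theorem compare_adj_lists_spec : Claim_equal_compare_adj_lists := by
  intro a1 a2 _
  unfold Spec_compare_adj_lists compare_adj_lists compare_adj_lists_alt
  by_cases h : a1.length = a2.length
  · simp [h, pv_loop_eq]
  · simp [h]
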